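-- pv_equiv track=rewrite | github.com/pongpatapee/advent-of-code | day11/day11.py | get_no_galaxy_cols
-- ===== SOURCE A (Python) =====
-- def get_no_galaxy_cols(image):
--     no_galaxy_cols = []
--
--     for c in range(len(image[0])):
--         has_galaxy = False
--         for r in range(len(image)):
--             if image[r][c] == "#":
--                 has_galaxy = True
--
--         if not has_galaxy:
--             no_galaxy_cols.append(c)
--
--     return no_galaxy_cols
-- ===== SOURCE B (Python) =====
-- def get_no_galaxy_cols(image):
--     width = len(image[0])
--     occupied = set()
--     for row in image:
--         for c, ch in enumerate(row):
--             if ch == "#":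
--                 occupied.add(c)
--     return [c for c in range(width) if c not in occupied]
-- ===== Notes on version B (the rewrite author's own statement) =====
-- stated objective: alternative
-- what changed: Replaces A's per-column flag scan of all rows with one row-wise pass that collects occupied column indices into a set and then emits the complement over the width.
import Mathlib
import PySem

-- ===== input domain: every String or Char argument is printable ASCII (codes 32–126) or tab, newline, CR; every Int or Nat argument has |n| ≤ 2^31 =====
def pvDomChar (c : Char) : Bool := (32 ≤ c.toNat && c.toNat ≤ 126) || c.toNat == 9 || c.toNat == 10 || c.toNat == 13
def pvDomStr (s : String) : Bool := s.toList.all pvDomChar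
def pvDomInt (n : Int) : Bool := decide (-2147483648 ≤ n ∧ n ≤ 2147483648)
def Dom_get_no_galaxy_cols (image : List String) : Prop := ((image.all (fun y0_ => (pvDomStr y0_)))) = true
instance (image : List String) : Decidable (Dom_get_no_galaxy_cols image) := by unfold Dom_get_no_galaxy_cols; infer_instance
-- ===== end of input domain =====

-- B replaces A's per-column scan of all rows by one row-wise pass that collects the
-- occupied column indices into a set and then emits the complement (objective: alternative).

-- ===== PORT A =====
-- for c in range(len(image[0])): flag-scan all rows, collect c when no '#'
def get_no_galaxy_cols (image : List String) : List Int :=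
  (PySem.List.pyRange 0 ((PySem.List.pyGetD image 0 "").toList.length : Int)).foldl
    (fun acc c =>
      let has_galaxy :=
        (PySem.List.pyRange 0 (image.length : Int)).foldl
          (fun h r =>
            if PySem.List.pyGetD (PySem.List.pyGetD image r "").toList c ' ' == '#' then true else h)
          false
      if !has_galaxy then acc ++ [c] else acc)
    []

-- ===== PORT B =====
-- one pass building the set of occupied columns, then the complement over the width
def get_no_galaxy_cols_alt (image : List String) : List Int :=
  let occupied : PySem.Set Int :=
    image.foldl
      (fun occ row =>
        (PySem.List.enumerate row.toList).foldl
          (fun o p => if p.2 == '#' then PySem.Set.add o p.1 else o) occ)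
      (PySem.Set.ofList [])
  (PySem.List.pyRange 0 ((PySem.List.pyGetD image 0 "").toList.length : Int)).filter
    (fun c => !(occupied.contains c))

-- ===== PRECONDITION & SPEC =====
-- Pre_ excludes exactly the inputs where A raises IndexError: the empty grid (image[0])
-- and ragged grids where some row is shorter than the first row (image[r][c]).
def Pre_get_no_galaxy_cols (image : List String) : Prop :=
  image ≠ [] ∧ ∀ s ∈ image, (image.headD "").toList.length ≤ s.toList.length
instance (image : List String) : Decidable (Pre_get_no_galaxy_cols image) := by
  unfold Pre_get_no_galaxy_cols; infer_instance
def pvWitness_get_no_galaxy_cols : List String := ["#..", ".#.", "..."]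

def Spec_get_no_galaxy_cols (image : List String) (out : List Int) : Prop := out = get_no_galaxy_cols_alt image
instance (image : List String) (out : List Int) : Decidable (Spec_get_no_galaxy_cols image out) := by unfold Spec_get_no_galaxy_cols; infer_instance

-- ===== CLAIM (what is proved, stated in full; the proofs are below) =====
def Claim_equal_get_no_galaxy_cols : Prop := ∀ (image : List String), Dom_get_no_galaxy_cols image → Pre_get_no_galaxy_cols image → Spec_get_no_galaxy_cols image (get_no_galaxy_cols image)

-- ===== LEMMAS AND PROOFS =====


-- A's inner flag loop is an `any` over the rows
theorem pv_foldl_flag {α : Type} (p : α → Bool) (l : List α) (b : Bool) :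
    l.foldl (fun h row => if p row then true else h) b = (b || l.any p) := by
  induction l generalizing b with
  | nil => simp
  | cons x xs ih =>
    simp only [List.foldl_cons]
    rw [ih]
    by_cases h : p x <;> simp [h]

-- membership in the per-row fold of B
theorem pv_mem_rowfold (l : List Char) (occ : List Int) (s x : Int) :
    x ∈ (PySem.List.enumerate l s).foldl
          (fun o p => if p.2 == '#' then PySem.Set.add o p.1 else o) occ
      ↔ x ∈ occ ∨ ∃ k : Nat, k < l.length ∧ l[k]? = some '#' ∧ x = s + k := by
  induction l generalizing occ s with
  | nil => simp [PySem.List.enumerate]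
  | cons c cs ih =>
    rw [PySem.List.enumerate_cons]
    simp only [List.foldl_cons]
    by_cases hc : c = '#'
    · subst hc
      simp only [beq_self_eq_true, if_pos, ih, PySem.Set.mem_add]
      constructor
      · rintro ((h | h) | ⟨k, hk, hg, hx⟩)
        · exact Or.inl h
        · exact Or.inr ⟨0, by simp, by simp, by simpa using h⟩
        · exact Or.inr ⟨k + 1, by simpa using hk, by simpa using hg, by push_cast at hx ⊢; omega⟩
      · rintro (h | ⟨k, hk, hg, hx⟩)
        · exact Or.inl (Or.inl h)
        · cases k with
          | zero => exact Or.inl (Or.inr (by simpa using hx))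
          | succ k =>
            exact Or.inr ⟨k, by simpa using hk, by simpa using hg, by push_cast at hx ⊢; omega⟩
    · rw [if_neg (show ¬((c == '#') = true) by simp [hc]), ih]
      constructor
      · rintro (h | ⟨k, hk, hg, hx⟩)
        · exact Or.inl h
        · exact Or.inr ⟨k + 1, by simpa using hk, by simpa using hg, by push_cast at hx ⊢; omega⟩
      · rintro (h | ⟨k, hk, hg, hx⟩)
        · exact Or.inl h
        · cases k with
          | zero => exact absurd (by simpa using hg) hc
          | succ k =>
            exact Or.inr ⟨k, by simpa using hk, by simpa using hg, by push_cast at hx ⊢; omega⟩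

-- membership in B's occupied set
theorem pv_mem_occ (image : List String) (occ : List Int) (x : Int) :
    x ∈ image.foldl
          (fun occ row =>
            (PySem.List.enumerate row.toList).foldl
              (fun o p => if p.2 == '#' then PySem.Set.add o p.1 else o) occ)
          occ
      ↔ x ∈ occ ∨ ∃ row ∈ image, ∃ k : Nat,
          k < row.toList.length ∧ row.toList[k]? = some '#' ∧ x = (k : Int) := by
  induction image generalizing occ with
  | nil => simp
  | cons row rows ih =>
    simp only [List.foldl_cons, ih, pv_mem_rowfold]
    constructor
    · rintro ((h | ⟨k, hk, hg, hx⟩) | ⟨r, hr, hrest⟩)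
      · exact Or.inl h
      · exact Or.inr ⟨row, by simp, k, hk, hg, by omega⟩
      · exact Or.inr ⟨r, by simp [hr], hrest⟩
    · rintro (h | ⟨r, hr, hrest⟩)
      · exact Or.inl (Or.inl h)
      · rcases List.mem_cons.mp hr with h | h
        · subst h
          obtain ⟨k, hk, hg, hx⟩ := hrest
          exact Or.inl (Or.inr ⟨k, hk, hg, by omega⟩)
        · exact Or.inr ⟨r, h, hrest⟩

-- ===== VERDICT (by name: the statement is the Claim_ definition above) =====
theorem get_no_galaxy_cols_spec : Claim_equal_get_no_galaxy_cols := by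
  intro image _ hpre
  obtain ⟨hne, hlen⟩ := hpre
  unfold Spec_get_no_galaxy_cols get_no_galaxy_cols get_no_galaxy_cols_alt
  rw [PySem.List.foldl_append_if (fun c =>
        !(PySem.List.pyRange 0 (image.length : Int)).foldl
          (fun h r =>
            if PySem.List.pyGetD (PySem.List.pyGetD image r "").toList c ' ' == '#' then true else h)
          false) (fun c => c)]
  rw [List.map_id']
  simp only [List.nil_append]
  apply List.filter_congr
  intro c hc
  rw [PySem.List.mem_pyRange_one] at hc
  have h0 : PySem.List.pyGetD image 0 "" = image.headD "" := by
    cases image with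
    | nil => exact absurd rfl hne
    | cons a l => simp [PySem.List.pyGetD]
  rw [h0] at hc
  -- turn A's row-index loop into a fold over the rows, then an `any`
  have hA := PySem.List.foldl_pyRange_zero_pyGetD image ""
      (fun h row => if PySem.List.pyGetD row.toList c ' ' == '#' then true else h) false
  simp only [PySem.List.len] at hA
  rw [hA, pv_foldl_flag (fun row => PySem.List.pyGetD row.toList c ' ' == '#') image false,
      Bool.false_or]
  congr 1
  -- any over rows  =  membership in B's occupied set
  rw [← Bool.coe_iff_coe]
  simp only [PySem.Set.contains, List.contains_iff_mem, List.any_eq_true]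
  rw [pv_mem_occ]
  simp only [beq_iff_eq, PySem.Set.mem_ofList, List.not_mem_nil, false_or]
  constructor
  · rintro ⟨row, hrow, hhit⟩
    have hw : (image.headD "").toList.length ≤ row.toList.length := hlen row hrow
    have hlt : c.toNat < row.toList.length := by omega
    rw [PySem.List.pyGetD_eq_getElem row.toList ' ' (by omega) (by omega)] at hhit
    exact ⟨row, hrow, c.toNat, hlt, by simp [List.getElem?_eq_getElem hlt, hhit], by omega⟩
  · rintro ⟨row, hrow, k, hk, hg, hx⟩
    refine ⟨row, hrow, ?_⟩
    have hck : c.toNat = k := by omega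
    rw [PySem.List.pyGetD_eq_getElem row.toList ' ' (by omega) (by omega)]
    rw [List.getElem?_eq_getElem hk] at hg
    simp only [hck]
    simpa using hg
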